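-- pv_equiv track=rewrite | github.com/jzamora5/holbertonschool-interview | 0x10-rain/0-rain.py | check_ahead
-- ===== SOURCE A (Python) =====
-- def check_ahead(walls, a, j):
--     """ Checks if there are greater or equal values ahead """
--     check = False
--     middle = []
--
--     while j < len(walls):
--         if a < walls[j] or a == walls[j]:
--             check = True
--             break
--         middle.append(walls[j])
--         j += 1
--
--     return check, middle, j
-- ===== SOURCE B (Python) =====
-- def check_ahead(walls, a, j):
--     """ Checks if there are greater or equal values ahead """
--     n = len(walls)
--
--     def first_ge(lo, hi):
--         # divide-and-conquer: first index in [lo, hi) with walls[i] >= a, else hi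
--         # (returns lo when the interval is empty, matching an untouched cursor)
--         if lo >= hi:
--             return lo
--         if hi - lo == 1:
--             return lo if walls[lo] >= a else hi
--         mid = lo + (hi - lo) // 2
--         left = first_ge(lo, mid)
--         if left < mid:
--             return left
--         return first_ge(mid, hi)
--
--     stop = first_ge(j, n)
--     return stop < n, [walls[k] for k in range(j, stop)], stop
-- ===== Notes on version B (the rewrite author's own statement) =====
-- stated objective: alternative
-- what changed: B finds the stopping index by a divide-and-conquer first-match search (recursively splitting the index interval at its midpoint) instead of A's single linear loop with a flag and an element-by-element accumulator, then materialises the gap with one range comprehension.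
-- outside the precondition, e.g. on check_ahead([3], 5, -2): A raises IndexError, B raises IndexError
import Mathlib
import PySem

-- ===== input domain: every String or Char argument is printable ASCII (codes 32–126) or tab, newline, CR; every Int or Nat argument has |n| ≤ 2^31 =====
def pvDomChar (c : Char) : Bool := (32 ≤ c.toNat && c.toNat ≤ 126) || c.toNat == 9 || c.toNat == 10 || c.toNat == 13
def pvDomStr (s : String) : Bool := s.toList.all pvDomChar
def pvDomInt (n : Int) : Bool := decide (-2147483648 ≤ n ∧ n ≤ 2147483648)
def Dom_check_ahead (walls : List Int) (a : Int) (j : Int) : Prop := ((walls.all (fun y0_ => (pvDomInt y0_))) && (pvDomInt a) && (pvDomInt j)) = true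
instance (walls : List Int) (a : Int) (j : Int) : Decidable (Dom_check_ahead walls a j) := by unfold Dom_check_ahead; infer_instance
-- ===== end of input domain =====

-- B replaces A's linear flag-and-accumulator loop by a divide-and-conquer first-match
-- search for the stopping index plus one range comprehension for the gap (alternative
-- algorithm, same O(n) cost).

-- ===== PORT A =====
-- A's while loop: flag `check`, accumulator `middle`, break on a <= walls[j].
def caLoopA (walls : List Int) (a : Int) (j : Int) (middle : List Int) : Bool × List Int × Int :=
  if _h : j < (walls.length : Int) then
    match PySem.List.pyGet? walls j with
    | none => (false, middle, j)      -- IndexError in Python (j < -len); outside Pre_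
    | some w =>
      if a < w ∨ a = w then (true, middle, j)
      else caLoopA walls a (j + 1) (middle ++ [w])
  else (false, middle, j)
termination_by ((walls.length : Int) - j).toNat
decreasing_by omega

def check_ahead (walls : List Int) (a : Int) (j : Int) : Bool × List Int × Int :=
  caLoopA walls a j []

-- ===== PORT B =====
-- B's first_ge: divide-and-conquer first index in [lo, hi) with walls[i] >= a, else hi
-- (lo when the interval is empty).  Structural recursion on a fuel counter that bounds
-- the interval width; the fuel only makes the recursion total, it never changes a result.
def caFirstGeGo (walls : List Int) (a : Int) : Nat → Int → Int → Int
  | 0, lo, _ => lo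
  | fuel + 1, lo, hi =>
    if lo ≥ hi then lo
    else if hi - lo = 1 then
      match PySem.List.pyGet? walls lo with
      | none => hi                    -- IndexError in Python (lo < -len); outside Pre_
      | some w => if a ≤ w then lo else hi
    else
      let mid := lo + PySem.Int.floordiv (hi - lo) 2
      let left := caFirstGeGo walls a fuel lo mid
      if left < mid then left else caFirstGeGo walls a fuel mid hi

def caFirstGe (walls : List Int) (a : Int) (lo hi : Int) : Int :=
  caFirstGeGo walls a (hi - lo).toNat lo hi

def check_ahead_alt (walls : List Int) (a : Int) (j : Int) : Bool × List Int × Int :=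
  let stop := caFirstGe walls a j (walls.length : Int)
  (decide (stop < (walls.length : Int)),
   (PySem.List.pyRange j stop 1).map (fun k => PySem.List.pyGetD walls k 0),
   stop)

-- ===== PRECONDITION & SPEC =====
-- Pre_ excludes exactly the inputs where A raises IndexError: j < -len(walls)
-- (the first access walls[j] is out of range even after Python's negative wraparound).
def Pre_check_ahead (walls : List Int) (a : Int) (j : Int) : Prop :=
  -(walls.length : Int) ≤ j
instance (walls : List Int) (a : Int) (j : Int) : Decidable (Pre_check_ahead walls a j) := by
  unfold Pre_check_ahead; infer_instance

def pvWitness_check_ahead : List Int × Int × Int := ([1, 0, 2, 0, 1], 2, 1)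

def Spec_check_ahead (walls : List Int) (a : Int) (j : Int) (out : Bool × List Int × Int) : Prop := out = check_ahead_alt walls a j
instance (walls : List Int) (a : Int) (j : Int) (out : Bool × List Int × Int) : Decidable (Spec_check_ahead walls a j out) := by unfold Spec_check_ahead; infer_instance

-- ===== CLAIM =====
def Claim_equal_check_ahead : Prop := ∀ (walls : List Int) (a : Int) (j : Int), Dom_check_ahead walls a j → Pre_check_ahead walls a j → Spec_check_ahead walls a j (check_ahead walls a j)

-- ===== LEMMAS AND PROOFS =====

-- Linear-scan reference: first index in [lo, hi) with a <= walls[i], else hi (lo if lo >= hi).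
def linS (walls : List Int) (a : Int) (lo hi : Int) : Int :=
  if _h : lo < hi then
    match PySem.List.pyGet? walls lo with
    | none => hi
    | some w => if a ≤ w then lo else linS walls a (lo + 1) hi
  else lo
termination_by (hi - lo).toNat
decreasing_by omega

theorem linS_bounds (walls : List Int) (a : Int) (lo hi : Int) (h : lo ≤ hi) :
    lo ≤ linS walls a lo hi ∧ linS walls a lo hi ≤ hi := by
  rw [linS]
  split
  · rename_i hlt
    cases hg : PySem.List.pyGet? walls lo with
    | none => simp; omega
    | some w =>
      simp only
      split
      · omega
      · have := linS_bounds walls a (lo + 1) hi (by omega)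
        omega
  · omega
termination_by (hi - lo).toNat
decreasing_by omega

theorem linS_merge (walls : List Int) (a : Int) (lo mid hi : Int)
    (h1 : lo ≤ mid) (h2 : mid ≤ hi)
    (hlo : -(walls.length : Int) ≤ lo) (hhi : hi ≤ (walls.length : Int)) :
    linS walls a lo hi =
      if linS walls a lo mid < mid then linS walls a lo mid else linS walls a mid hi := by
  by_cases heq : lo = mid
  · subst heq
    have hll : linS walls a lo lo = lo := by rw [linS, dif_neg (by omega)]
    rw [hll, if_neg (by omega)]
  · have hlm : lo < mid := by omega
    have hlh : lo < hi := by omega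
    cases hg : PySem.List.pyGet? walls lo with
    | none =>
      rw [PySem.List.pyGet?_eq_none_iff] at hg
      simp [PySem.Raise.InRange] at hg
      omega
    | some w =>
      rw [linS, dif_pos hlh, hg]
      conv_rhs => rw [linS, dif_pos hlm, hg]
      simp only
      split
      · rfl
      · rw [linS_merge walls a (lo + 1) mid hi (by omega) h2 (by omega) hhi]
termination_by (mid - lo).toNat
decreasing_by omega

theorem firstGeGo_eq_linS (walls : List Int) (a : Int) (fuel : Nat) (lo hi : Int)
    (hf : (hi - lo).toNat ≤ fuel)
    (hlo : -(walls.length : Int) ≤ lo) (hhi : hi ≤ (walls.length : Int)) :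
    caFirstGeGo walls a fuel lo hi = linS walls a lo hi := by
  induction fuel generalizing lo hi with
  | zero =>
    have : ¬ lo < hi := by omega
    rw [caFirstGeGo, linS, dif_neg this]
  | succ fuel ih =>
    rw [caFirstGeGo]
    split
    · rename_i hge
      rw [linS, dif_neg (by omega)]
    · rename_i hge
      split
      · rename_i h1
        cases hg : PySem.List.pyGet? walls lo with
        | none =>
          rw [PySem.List.pyGet?_eq_none_iff] at hg
          simp [PySem.Raise.InRange] at hg
          omega
        | some w =>
          rw [linS, dif_pos (by omega), hg]
          simp only
          split
          · rfl
          · rw [linS, dif_neg (by omega)]; omega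
      · rename_i h1
        have h2 : (2:Int) ≤ hi - lo := by omega
        have hd := PySem.Int.floordiv_eq_ediv_of_pos (a := hi - lo) (b := 2) (by omega)
        have hmid1 : lo < lo + PySem.Int.floordiv (hi - lo) 2 := by omega
        have hmid2 : lo + PySem.Int.floordiv (hi - lo) 2 < hi := by omega
        dsimp only
        rw [ih lo (lo + PySem.Int.floordiv (hi - lo) 2) (by omega) hlo (by omega),
            ih (lo + PySem.Int.floordiv (hi - lo) 2) hi (by omega) (by omega) hhi,
            linS_merge walls a lo (lo + PySem.Int.floordiv (hi - lo) 2) hi (by omega) (by omega) hlo hhi]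

theorem firstGe_eq_linS (walls : List Int) (a : Int) (lo hi : Int)
    (hlo : -(walls.length : Int) ≤ lo) (hhi : hi ≤ (walls.length : Int)) :
    caFirstGe walls a lo hi = linS walls a lo hi :=
  firstGeGo_eq_linS walls a (hi - lo).toNat lo hi (le_refl _) hlo hhi

theorem pyGetD_of_some (walls : List Int) (i w d : Int)
    (h : PySem.List.pyGet? walls i = some w) : PySem.List.pyGetD walls i d = w := by
  simp [PySem.List.pyGetD, PySem.List.pyGet?] at *
  simp [h]

theorem caLoop_eq (walls : List Int) (a : Int) (j : Int) (middle : List Int)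
    (hpre : -(walls.length : Int) ≤ j) :
    caLoopA walls a j middle =
      (decide (linS walls a j (walls.length : Int) < (walls.length : Int)),
       middle ++ (PySem.List.pyRange j (linS walls a j (walls.length : Int)) 1).map
          (fun k => PySem.List.pyGetD walls k 0),
       linS walls a j (walls.length : Int)) := by
  rw [caLoopA]
  split
  · rename_i h
    cases hg : PySem.List.pyGet? walls j with
    | none =>
      rw [PySem.List.pyGet?_eq_none_iff] at hg
      simp [PySem.Raise.InRange] at hg
      omega
    | some w =>
      simp only
      by_cases hb : a < w ∨ a = w
      · have hwa : a ≤ w := by rcases hb with h' | h' <;> omega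
        have hstop : linS walls a j (walls.length : Int) = j := by
          rw [linS, dif_pos h, hg]; simp [hwa]
        rw [if_pos hb, hstop]
        simp [PySem.List.pyRange_one_eq_nil (le_refl j), h]
      · have hwa : ¬ a ≤ w := by push Not at hb; omega
        have hstop : linS walls a j (walls.length : Int) = linS walls a (j + 1) (walls.length : Int) := by
          rw [linS, dif_pos h, hg]; simp [hwa]
        rw [if_neg hb, hstop, caLoop_eq walls a (j + 1) (middle ++ [w]) (by omega)]
        have hge : j + 1 ≤ linS walls a (j + 1) (walls.length : Int) :=
          (linS_bounds walls a (j + 1) (walls.length : Int) (by omega)).1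
        rw [PySem.List.pyRange_one_cons (show j < linS walls a (j + 1) (walls.length : Int) by omega)]
        simp [pyGetD_of_some walls j w 0 hg]
  · rename_i h
    have hstop : linS walls a j (walls.length : Int) = j := by
      rw [linS, dif_neg h]
    rw [hstop]
    simp [PySem.List.pyRange_one_eq_nil (le_refl j), h]
termination_by ((walls.length : Int) - j).toNat
decreasing_by omega

-- ===== VERDICT =====
theorem check_ahead_spec : Claim_equal_check_ahead := by
  intro walls a j _hdom hpre
  unfold Spec_check_ahead check_ahead check_ahead_alt
  rw [firstGe_eq_linS walls a j (walls.length : Int) hpre (le_refl _)]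
  simpa using caLoop_eq walls a j [] hpre
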